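-- pv_equiv track=rewrite | github.com/RacleRay/MyLeetCodeLife | CodePractice/DFS/不重复元素的子集.py | dfs3
-- ===== SOURCE A (Python) =====
-- def dfs3(nums, results):
--     q = []  # stack
--     q.append([])
--     while (len(q) > 0):
--         subset = q.pop()
--         results.append(subset[:])
--         for i in range(len(nums)):
--             if not subset or subset[-1] < nums[i]:
--                 newsub = subset[:]
--                 newsub.append(nums[i])
--                 q.append(newsub)
--     return results
-- ===== SOURCE B (Python) =====
-- def dfs3(nums, results):
--     # Recursive preorder DFS; reversed candidate order matches the stack's LIFO pop order.
--     # Like A, this appends to (mutates) the passed-in `results` list.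
--     def rec(subset):
--         results.append(subset)
--         for i in reversed(range(len(nums))):
--             if not subset or subset[-1] < nums[i]:
--                 rec(subset + [nums[i]])
--     rec([])
--     return results
-- ===== Notes on version B (the rewrite author's own statement) =====
-- stated objective: simpler
-- what changed: Replaces A's explicit LIFO work-stack while-loop by a recursive preorder DFS helper that records the subset and recurses over candidates in reverse order, eliminating the stack and the subset-copying bookkeeping.
import Mathlib
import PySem

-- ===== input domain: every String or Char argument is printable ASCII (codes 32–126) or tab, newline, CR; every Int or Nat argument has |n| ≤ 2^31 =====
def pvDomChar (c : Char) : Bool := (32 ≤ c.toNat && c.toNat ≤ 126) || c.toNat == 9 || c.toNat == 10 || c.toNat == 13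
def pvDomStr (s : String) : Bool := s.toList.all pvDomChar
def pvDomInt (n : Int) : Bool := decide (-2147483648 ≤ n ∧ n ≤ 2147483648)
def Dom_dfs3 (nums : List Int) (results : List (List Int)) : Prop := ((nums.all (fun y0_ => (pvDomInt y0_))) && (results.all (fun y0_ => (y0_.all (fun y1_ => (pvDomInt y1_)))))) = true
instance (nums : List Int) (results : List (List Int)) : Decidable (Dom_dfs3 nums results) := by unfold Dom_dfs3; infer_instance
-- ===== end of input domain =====

-- B replaces A's explicit LIFO stack by a recursive preorder DFS (reversed candidate order);
-- objective: simpler/alternative decomposition. Both Pythons mutate `results` identically by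
-- appending; the theorems are about the returned value.

-- `not subset or subset[-1] < nums[i]` (the `||` short-circuits, so the default 0 is never used)
def childCond (subset : List Int) (v : Int) : Bool :=
  subset.isEmpty || decide (subset.getLastD 0 < v)

-- termination measure: number of distinct values of nums that could still extend `subset`
def uMeas (nums subset : List Int) : Nat :=
  (nums.filter (childCond subset)).toFinset.card

theorem uMeas_child_lt (nums subset : List Int) (v : Int)
    (hv : v ∈ nums) (hc : childCond subset v = true) :
    uMeas nums (subset ++ [v]) < uMeas nums subset := by
  have hcc : ∀ x : Int, childCond (subset ++ [v]) x = decide (v < x) := by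
    intro x; simp [childCond]
  have hsub : (nums.filter (childCond (subset ++ [v]))).toFinset ⊆
      (nums.filter (childCond subset)).toFinset := by
    intro x hx
    simp only [List.mem_toFinset, List.mem_filter] at hx ⊢
    obtain ⟨hxn, hxc⟩ := hx
    rw [hcc] at hxc
    have hvx : v < x := of_decide_eq_true hxc
    refine ⟨hxn, ?_⟩
    rcases Bool.or_eq_true_iff.mp hc with he | hl
    · simp [childCond, he]
    · have hlv : subset.getLastD 0 < v := of_decide_eq_true hl
      rw [List.getLastD_eq_getLast?] at hlv
      simp [childCond, decide_eq_true_eq]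
      exact Or.inr (lt_trans hlv hvx)
  apply Finset.card_lt_card
  rw [Finset.ssubset_iff_of_subset hsub]
  refine ⟨v, ?_, ?_⟩
  · simp [List.mem_filter, hv, hc]
  · simp [List.mem_filter, hcc]

-- the children A pushes for a popped `subset`, top of stack FIRST
def childStack (nums subset : List Int) : List (List Int) :=
  ((nums.filter (childCond subset)).map (fun v => subset ++ [v])).reverse

def stackM (nums : List Int) (q : List (List Int)) : Nat :=
  (q.map (fun s => (nums.length + 1) ^ uMeas nums s)).sum

theorem stackM_dec (nums : List Int) (s : List Int) (rest : List (List Int)) :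
    stackM nums (childStack nums s ++ rest) < stackM nums (s :: rest) := by
  have hchild : stackM nums (childStack nums s) < (nums.length + 1) ^ uMeas nums s := by
    have hrw : stackM nums (childStack nums s)
        = ((nums.filter (childCond s)).map
            (fun v => (nums.length + 1) ^ uMeas nums (s ++ [v]))).sum := by
      simp [stackM, childStack, List.map_reverse, List.map_map, Function.comp_def]
    rw [hrw]
    rcases List.eq_nil_or_concat' (nums.filter (childCond s)) with hF | ⟨_, _, _⟩
    · rw [hF]; simp [pow_pos]
    case _ h =>
      -- the filter is nonempty, so uMeas nums s ≥ 1
      have hne : nums.filter (childCond s) ≠ [] := by rw [h]; simp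
      obtain ⟨w, hw⟩ := List.exists_mem_of_ne_nil _ hne
      have hu : 1 ≤ uMeas nums s := by
        have : w ∈ (nums.filter (childCond s)).toFinset := List.mem_toFinset.mpr hw
        exact Finset.card_pos.mpr ⟨w, this⟩
      obtain ⟨u', hu'⟩ : ∃ u', uMeas nums s = u' + 1 :=
        ⟨uMeas nums s - 1, (Nat.succ_pred_eq_of_pos hu).symm⟩
      have hbound : ∀ x ∈ (nums.filter (childCond s)).map
          (fun v => (nums.length + 1) ^ uMeas nums (s ++ [v])),
          x ≤ (nums.length + 1) ^ u' := by
        intro x hx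
        obtain ⟨v, hvf, hvx⟩ := List.mem_map.mp hx
        have hvn : v ∈ nums := (List.mem_filter.mp hvf).1
        have hvc : childCond s v = true := (List.mem_filter.mp hvf).2
        have := uMeas_child_lt nums s v hvn hvc
        rw [hu'] at this
        subst hvx
        exact Nat.pow_le_pow_right (Nat.succ_le_succ (Nat.zero_le _)) (Nat.lt_succ_iff.mp this)
      calc ((nums.filter (childCond s)).map
              (fun v => (nums.length + 1) ^ uMeas nums (s ++ [v]))).sum
          ≤ ((nums.filter (childCond s)).map
              (fun v => (nums.length + 1) ^ uMeas nums (s ++ [v]))).length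
              • ((nums.length + 1) ^ u') := List.sum_le_card_nsmul _ _ hbound
        _ = (nums.filter (childCond s)).length * (nums.length + 1) ^ u' := by
              simp [smul_eq_mul]
        _ ≤ nums.length * (nums.length + 1) ^ u' :=
              Nat.mul_le_mul_right _ (List.length_filter_le _ _)
        _ < (nums.length + 1) * (nums.length + 1) ^ u' := by
              have hp : 0 < (nums.length + 1) ^ u' := pow_pos (Nat.succ_pos _) _
              exact Nat.mul_lt_mul_of_lt_of_le (Nat.lt_succ_self _) (le_refl _) hp
        _ = (nums.length + 1) ^ uMeas nums s := by rw [hu', pow_succ, Nat.mul_comm]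
  have : stackM nums (childStack nums s ++ rest)
      = stackM nums (childStack nums s) + stackM nums rest := by
    simp [stackM]
  rw [this]
  have h2 : stackM nums (s :: rest) = (nums.length + 1) ^ uMeas nums s + stackM nums rest := by
    simp [stackM]
  rw [h2]
  exact Nat.add_lt_add_right hchild _

-- fold building A's pushes in Python order (prepending, since our list is the stack reversed)
theorem foldl_cons_if (l : List Int) (p : Int → Bool) (f : Int → List Int) :
    ∀ acc : List (List Int),
      l.foldl (fun a x => if p x then f x :: a else a) acc
        = ((l.filter p).map f).reverse ++ acc := by
  induction l with
  | nil => intro acc; simp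
  | cons x xs ih =>
    intro acc
    by_cases hp : p x = true <;> simp [List.filter_cons, hp, ih]

-- ===== PORT A =====
-- A's while-loop; `q` is Python's stack with its TOP AT THE HEAD (Python list reversed):
-- `q.pop()` = take the head, and the inner `for`-loop pushes land reversed on top.
def loopA (nums : List Int) (q : List (List Int)) (results : List (List Int)) :
    List (List Int) :=
  match q with
  | [] => results
  | s :: rest =>
      loopA nums
        ((nums.foldl (fun a v => if childCond s v then (s ++ [v]) :: a else a) []) ++ rest)
        (results ++ [s])
  termination_by stackM nums q
  decreasing_by
    have e := foldl_cons_if nums (childCond s) (fun v => s ++ [v]) []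
    rw [List.append_nil] at e
    simp only [List.foldl_subtype, List.unattach_attach, dite_eq_ite]
    rw [e]
    exact stackM_dec nums s rest

def dfs3 (nums : List Int) (results : List (List Int)) : List (List Int) :=
  loopA nums [[]] results

-- ===== PORT B =====
-- B: recursive preorder DFS; the `hcs` proof argument only carries membership for termination.
mutual
def dfs3Rec (nums : List Int) (subset : List Int) (acc : List (List Int)) :
    List (List Int) :=
  dfs3RecLoop nums nums.reverse (fun _ hv => List.mem_reverse.mp hv) subset (acc ++ [subset])
  termination_by ((uMeas nums subset, nums.length + 1) : Nat × Nat)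
  decreasing_by
    apply Prod.Lex.right
    simp

-- `for i in reversed(range(len(nums)))` walking the remaining candidates `cs`
def dfs3RecLoop (nums : List Int) (cs : List Int) (hcs : ∀ v ∈ cs, v ∈ nums)
    (subset : List Int) (acc : List (List Int)) : List (List Int) :=
  match cs with
  | [] => acc
  | v :: rest =>
      if hcond : childCond subset v = true then
        dfs3RecLoop nums rest (fun x hx => hcs x (List.mem_cons_of_mem v hx)) subset
          (dfs3Rec nums (subset ++ [v]) acc)
      else
        dfs3RecLoop nums rest (fun x hx => hcs x (List.mem_cons_of_mem v hx)) subset acc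
  termination_by ((uMeas nums subset, cs.length) : Nat × Nat)
  decreasing_by
    · apply Prod.Lex.left
      exact uMeas_child_lt nums subset v (hcs v (List.mem_cons_self)) hcond
    · apply Prod.Lex.right; simp
    · apply Prod.Lex.right; simp
end

def dfs3_alt (nums : List Int) (results : List (List Int)) : List (List Int) :=
  dfs3Rec nums [] results

-- ===== PRECONDITION & SPEC =====
def Spec_dfs3 (nums : List Int) (results : List (List Int)) (out : List (List Int)) : Prop := out = dfs3_alt nums results
instance (nums : List Int) (results : List (List Int)) (out : List (List Int)) : Decidable (Spec_dfs3 nums results out) := by unfold Spec_dfs3; infer_instance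

-- ===== CLAIM (what is proved, stated in full; the proofs are below) =====
def Claim_equal_dfs3 : Prop := ∀ (nums : List Int) (results : List (List Int)), Dom_dfs3 nums results → Spec_dfs3 nums results (dfs3 nums results)

-- ===== LEMMAS AND PROOFS =====
theorem loopA_nil (nums : List Int) (res : List (List Int)) : loopA nums [] res = res := by
  rw [loopA.eq_def]

theorem loopA_cons (nums s : List Int) (rest res : List (List Int)) :
    loopA nums (s :: rest) res = loopA nums (childStack nums s ++ rest) (res ++ [s]) := by
  conv_lhs => rw [loopA.eq_def]
  show loopA nums
      ((nums.foldl (fun a v => if childCond s v then (s ++ [v]) :: a else a) []) ++ rest)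
      (res ++ [s]) = _
  rw [foldl_cons_if, List.append_nil]
  rfl

theorem childStack_eq (nums s : List Int) :
    childStack nums s = (nums.reverse.filter (childCond s)).map (fun v => s ++ [v]) := by
  simp [childStack, List.filter_reverse, List.map_reverse]

theorem loopA_append (nums : List Int) :
    ∀ n (q1 : List (List Int)), stackM nums q1 ≤ n →
      ∀ (q2 res : List (List Int)),
        loopA nums (q1 ++ q2) res = loopA nums q2 (loopA nums q1 res) := by
  intro n
  induction n using Nat.strong_induction_on with
  | _ n ih =>
    intro q1 hq1 q2 res
    match q1 with
    | [] => simp [loopA_nil]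
    | s :: rest =>
      rw [List.cons_append, loopA_cons, loopA_cons, ← List.append_assoc]
      exact ih (stackM nums (childStack nums s ++ rest))
        (lt_of_lt_of_le (stackM_dec nums s rest) hq1) _ le_rfl _ _

theorem recB_eq (nums subset : List Int) (acc : List (List Int)) :
    dfs3Rec nums subset acc
      = dfs3RecLoop nums nums.reverse (fun _ hv => List.mem_reverse.mp hv) subset
          (acc ++ [subset]) := by
  rw [dfs3Rec]

theorem chl_aux (nums : List Int) :
    ∀ n subset, uMeas nums subset ≤ n →
      ∀ (cs : List Int) (hcs : ∀ v ∈ cs, v ∈ nums) (acc : List (List Int)),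
        loopA nums ((cs.filter (childCond subset)).map (fun v => subset ++ [v])) acc
          = dfs3RecLoop nums cs hcs subset acc := by
  intro n
  induction n using Nat.strong_induction_on with
  | _ n ih =>
    intro subset hsub cs
    induction cs with
    | nil => intro hcs acc; rw [dfs3RecLoop]; simp [loopA_nil]
    | cons v rest ihcs =>
      intro hcs acc
      rw [dfs3RecLoop]
      by_cases hc : childCond subset v = true
      · simp only [hc, dite_true, List.filter_cons, if_true, List.map_cons]
        have hv : v ∈ nums := hcs v List.mem_cons_self
        have hlt : uMeas nums (subset ++ [v]) < uMeas nums subset :=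
          uMeas_child_lt nums subset v hv hc
        have hsingle : ∀ a : List (List Int),
            loopA nums [subset ++ [v]] a = dfs3Rec nums (subset ++ [v]) a := by
          intro a
          rw [loopA_cons, List.append_nil, childStack_eq, recB_eq]
          exact ih (uMeas nums (subset ++ [v])) (lt_of_lt_of_le hlt hsub)
            (subset ++ [v]) le_rfl nums.reverse _ _
        have := loopA_append nums (stackM nums [subset ++ [v]]) [subset ++ [v]] le_rfl
          ((rest.filter (childCond subset)).map (fun w => subset ++ [w])) acc
        rw [show (subset ++ [v]) :: (rest.filter (childCond subset)).map
              (fun w => subset ++ [w])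
            = [subset ++ [v]] ++ (rest.filter (childCond subset)).map
              (fun w => subset ++ [w]) from rfl, this, hsingle]
        exact ihcs _ _
      · simp only [hc, dite_false, List.filter_cons, if_neg hc]
        exact ihcs _ _

-- ===== VERDICT (by name: the statement is the Claim_ definition above) =====
theorem dfs3_spec : Claim_equal_dfs3 := by
  intro nums results _
  show dfs3 nums results = dfs3_alt nums results
  unfold dfs3 dfs3_alt
  rw [loopA_cons, List.append_nil, childStack_eq, recB_eq]
  exact chl_aux nums (uMeas nums []) [] le_rfl nums.reverse _ _
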